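-- pv_equiv track=rewrite | github.com/rizkikadafi/algorithm-course | custom_frog3.py | get_focus_elm
-- ===== SOURCE A (Python) =====
-- from heapq import heappush, heappop
-- from enum import IntEnum
-- import heapq
--
-- class Move(IntEnum):
--     NONE = 0,
--     RIGHT = 1,
--     RIGHT2 = 2,
--     LEFT = -1,
--     LEFT2 = -2
--
-- def get_focus_elm(state, priority_elm, possibilities_mov):
--     zero_idx = state.index(0)
--     result = []
--     for move in possibilities_mov:
--         match move:
--             case Move.RIGHT:
--                 heappush(result, (-priority_elm[state[zero_idx + 1]], state[zero_idx + 1]))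
--             case Move.RIGHT2:
--                 heappush(result, (-priority_elm[state[zero_idx + 2]], state[zero_idx + 2]))
--             case Move.LEFT:
--                 heappush(result, (-priority_elm[state[zero_idx - 1]], state[zero_idx - 1]))
--             case Move.LEFT2:
--                 heappush(result, (-priority_elm[state[zero_idx - 2]], state[zero_idx - 2]))
--
--     res = heapq.nsmallest(2, result)
--     if len(res) > 1 and res[0][0] == res[1][0]:
--         return res[1][1]
--     else:
--         return heappop(result)[1]
-- ===== SOURCE B (Python) =====
-- def get_focus_elm(state, priority_elm, possibilities_mov):
--     # One pass: keep the two lexicographically smallest (-priority, element) keys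
--     # instead of building a heap and sorting it.
--     offsets = {1: 1, 2: 2, -1: -1, -2: -2}
--     zero_idx = state.index(0)
--     best = None
--     second = None
--     for move in possibilities_mov:
--         if move in offsets:
--             e = state[zero_idx + offsets[move]]
--             k = (-priority_elm[e], e)
--             if best is None or k < best:
--                 best, second = k, best
--             elif second is None or k < second:
--                 second = k
--     if second is not None and best[0] == second[0]:
--         return second[1]
--     return best[1]
-- ===== Notes on version B (the rewrite author's own statement) =====
-- stated objective: alternative
-- what changed: Replaces the heap (heappush per move, then heapq.nsmallest(2) and heappop) with a single selection pass over the moves that keeps only the two lexicographically smallest (-priority, element) keys, so no heap or sorted list is ever built.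
import Mathlib
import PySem

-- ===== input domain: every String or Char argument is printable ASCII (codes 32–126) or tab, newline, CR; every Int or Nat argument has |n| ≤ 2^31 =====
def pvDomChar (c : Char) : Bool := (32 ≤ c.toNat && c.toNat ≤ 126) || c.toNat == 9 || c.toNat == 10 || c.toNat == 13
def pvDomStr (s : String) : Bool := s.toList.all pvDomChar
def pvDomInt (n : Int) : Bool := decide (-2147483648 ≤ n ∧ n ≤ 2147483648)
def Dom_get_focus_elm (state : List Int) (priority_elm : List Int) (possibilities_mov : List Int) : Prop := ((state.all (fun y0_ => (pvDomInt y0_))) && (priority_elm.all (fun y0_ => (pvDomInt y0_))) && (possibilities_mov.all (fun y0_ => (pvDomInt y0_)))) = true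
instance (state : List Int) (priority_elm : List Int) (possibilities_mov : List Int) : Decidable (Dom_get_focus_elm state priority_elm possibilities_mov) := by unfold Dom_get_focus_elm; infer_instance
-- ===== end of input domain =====

-- B replaces A's heap + nsmallest + heappop with a single selection pass that keeps the two
-- lexicographically smallest (-priority, element) keys (objective: alternative/simpler per pass).

-- ===== PORT A =====
-- heapq is ported by its documented semantics: the heap list holds exactly the pushed pairs
-- (heappush appends), heapq.nsmallest 2 is the first two elements of the sorted order, and
-- heappop returns the minimum, i.e. the head of the sorted order.  This is exact here because
-- the heap is consumed only through these order-insensitive library calls.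
def get_focus_elm (state : List Int) (priority_elm : List Int) (possibilities_mov : List Int) : Int :=
  -- zero_idx = state.index(0); Python raises ValueError when 0 ∉ state — excluded by Pre_
  let zero_idx : Int := (((PySem.List.index? state 0).getD 0 : Nat) : Int)
  let result : List (Int × Int) := possibilities_mov.foldl (fun r move =>
    if move = 1 then
      r ++ [(-(PySem.List.pyGetD priority_elm (PySem.List.pyGetD state (zero_idx + 1) 0) 0),
             PySem.List.pyGetD state (zero_idx + 1) 0)]
    else if move = 2 then
      r ++ [(-(PySem.List.pyGetD priority_elm (PySem.List.pyGetD state (zero_idx + 2) 0) 0),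
             PySem.List.pyGetD state (zero_idx + 2) 0)]
    else if move = -1 then
      r ++ [(-(PySem.List.pyGetD priority_elm (PySem.List.pyGetD state (zero_idx - 1) 0) 0),
             PySem.List.pyGetD state (zero_idx - 1) 0)]
    else if move = -2 then
      r ++ [(-(PySem.List.pyGetD priority_elm (PySem.List.pyGetD state (zero_idx - 2) 0) 0),
             PySem.List.pyGetD state (zero_idx - 2) 0)]
    else r) []
  let sortedResult := PySem.List.sorted2 result (fun p => p.1) (fun p => p.2)
  let res := sortedResult.take 2
  -- heappop on an empty heap raises IndexError — excluded by Pre_ (default (0,0) is never read there)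
  if 1 < res.length ∧ (res.getD 0 (0, 0)).1 = (res.getD 1 (0, 0)).1 then
    (res.getD 1 (0, 0)).2
  else
    (sortedResult.getD 0 (0, 0)).2

-- ===== PORT B =====
-- Python tuple comparison (-p1, e1) < (-p2, e2), lexicographic
def pvKeyLt (a b : Int × Int) : Bool := decide (a.1 < b.1) || (a.1 == b.1 && decide (a.2 < b.2))

-- one selection step of B: keep the two smallest keys seen so far
def pvStep2 (acc : Option (Int × Int) × Option (Int × Int)) (k : Int × Int) :
    Option (Int × Int) × Option (Int × Int) :=
  if acc.1.elim true (fun b => pvKeyLt k b) then (some k, acc.1)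
  else if acc.2.elim true (fun s => pvKeyLt k s) then (acc.1, some k)
  else acc

def get_focus_elm_alt (state : List Int) (priority_elm : List Int) (possibilities_mov : List Int) : Int :=
  let offsets : PySem.Dict Int Int := PySem.Dict.ofList [(1, 1), (2, 2), (-1, -1), (-2, -2)]
  let zero_idx : Int := (((PySem.List.index? state 0).getD 0 : Nat) : Int)
  let bs := possibilities_mov.foldl (fun acc move =>
      match PySem.Dict.get? offsets move with
      | none => acc
      | some off =>
        let e := PySem.List.pyGetD state (zero_idx + off) 0
        pvStep2 acc (-(PySem.List.pyGetD priority_elm e 0), e)) (none, none)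
  match bs.1, bs.2 with
  | some b, some s => if b.1 = s.1 then s.2 else b.2
  | some b, none => b.2
  | none, _ => 0   -- Source B raises here (best is None); excluded by Pre_

-- ===== PRECONDITION & SPEC =====
-- Pre_ = exactly where the Python A returns: 0 occurs in state (else ValueError from state.index),
-- every recognised move indexes state and priority_elm in (Python, negative-wrapping) range
-- (else IndexError), and at least one recognised move exists (else heappop raises IndexError).
def Pre_get_focus_elm (state : List Int) (priority_elm : List Int) (possibilities_mov : List Int) : Prop :=
  0 ∈ state ∧
  (∀ m ∈ possibilities_mov, (m = 1 ∨ m = 2 ∨ m = -1 ∨ m = -2) →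
    PySem.Raise.InRange state.length (((List.idxOf 0 state : Nat) : Int) + m) ∧
    PySem.Raise.InRange priority_elm.length
      (PySem.List.pyGetD state (((List.idxOf 0 state : Nat) : Int) + m) 0)) ∧
  (∃ m ∈ possibilities_mov, m = 1 ∨ m = 2 ∨ m = -1 ∨ m = -2)
instance (state : List Int) (priority_elm : List Int) (possibilities_mov : List Int) : Decidable (Pre_get_focus_elm state priority_elm possibilities_mov) := by unfold Pre_get_focus_elm; infer_instance

def pvWitness_get_focus_elm : List Int × List Int × List Int := ([0, 1], [5, 7], [1])

def Spec_get_focus_elm (state : List Int) (priority_elm : List Int) (possibilities_mov : List Int) (out : Int) : Prop := out = get_focus_elm_alt state priority_elm possibilities_mov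
instance (state : List Int) (priority_elm : List Int) (possibilities_mov : List Int) (out : Int) : Decidable (Spec_get_focus_elm state priority_elm possibilities_mov out) := by unfold Spec_get_focus_elm; infer_instance

-- ===== CLAIM (what is proved, stated in full; the proofs are below) =====
def Claim_equal_get_focus_elm : Prop := ∀ (state : List Int) (priority_elm : List Int) (possibilities_mov : List Int), Dom_get_focus_elm state priority_elm possibilities_mov → Pre_get_focus_elm state priority_elm possibilities_mov → Spec_get_focus_elm state priority_elm possibilities_mov (get_focus_elm state priority_elm possibilities_mov)

-- ===== LEMMAS AND PROOFS =====

-- the candidate (-priority, element) pair produced by a recognised move m (its offset is m itself)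
def pvPair (state priority_elm : List Int) (z m : Int) : Int × Int :=
  (-(PySem.List.pyGetD priority_elm (PySem.List.pyGetD state (z + m) 0) 0),
   PySem.List.pyGetD state (z + m) 0)

-- the list of candidate pairs, in move order
def pvCands (state priority_elm : List Int) (z : Int) (mov : List Int) : List (Int × Int) :=
  mov.filterMap (fun m =>
    if m = 1 ∨ m = 2 ∨ m = -1 ∨ m = -2 then some (pvPair state priority_elm z m) else none)

-- sorted2's comparison is pvKeyLt
lemma pvSorted2_eq (l : List (Int × Int)) :
    PySem.List.sorted2 l (fun p => p.1) (fun p => p.2) =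
      l.foldl (fun acc x => PySem.List.insertBy pvKeyLt x acc) [] := by
  have h : (fun (a b : Int × Int) =>
      decide (a.1 < b.1) || (!decide (b.1 < a.1) && decide (a.2 < b.2))) = pvKeyLt := by
    funext a b
    by_cases h1 : a.1 < b.1 <;> by_cases h2 : b.1 < a.1 <;> by_cases h3 : a.1 = b.1 <;>
      (first | (simp [pvKeyLt, h1, h2, h3]; omega) | simp [pvKeyLt, h1, h2, h3])
  simp only [PySem.List.sorted2, if_neg (by decide : ¬ (false = true))]
  rw [h]

-- A's heap-building loop with the move dispatch condensed to one condition
lemma pvFoldAIf (state priority_elm : List Int) (z : Int) (mov : List Int) :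
    ∀ r : List (Int × Int),
    mov.foldl (fun r move =>
        if move = 1 ∨ move = 2 ∨ move = -1 ∨ move = -2 then
          r ++ [pvPair state priority_elm z move] else r) r
      = r ++ pvCands state priority_elm z mov := by
  induction mov with
  | nil => intro r; simp [pvCands]
  | cons m t ih =>
    intro r
    rw [List.foldl_cons]
    by_cases h : m = 1 ∨ m = 2 ∨ m = -1 ∨ m = -2
    · rw [if_pos h, ih]
      simp only [pvCands, List.filterMap_cons, if_pos h, List.append_assoc, List.singleton_append]
    · rw [if_neg h, ih]
      simp only [pvCands, List.filterMap_cons, if_neg h]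

-- A's heap-building loop collects exactly the candidate pairs
lemma pvFoldA (state priority_elm : List Int) (z : Int) (mov : List Int) : ∀ r : List (Int × Int),
    mov.foldl (fun r move =>
      if move = 1 then
        r ++ [(-(PySem.List.pyGetD priority_elm (PySem.List.pyGetD state (z + 1) 0) 0),
               PySem.List.pyGetD state (z + 1) 0)]
      else if move = 2 then
        r ++ [(-(PySem.List.pyGetD priority_elm (PySem.List.pyGetD state (z + 2) 0) 0),
               PySem.List.pyGetD state (z + 2) 0)]
      else if move = -1 then
        r ++ [(-(PySem.List.pyGetD priority_elm (PySem.List.pyGetD state (z - 1) 0) 0),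
               PySem.List.pyGetD state (z - 1) 0)]
      else if move = -2 then
        r ++ [(-(PySem.List.pyGetD priority_elm (PySem.List.pyGetD state (z - 2) 0) 0),
               PySem.List.pyGetD state (z - 2) 0)]
      else r) r = r ++ pvCands state priority_elm z mov := by
  have hstep : (fun (r : List (Int × Int)) (move : Int) =>
      if move = 1 then
        r ++ [(-(PySem.List.pyGetD priority_elm (PySem.List.pyGetD state (z + 1) 0) 0),
               PySem.List.pyGetD state (z + 1) 0)]
      else if move = 2 then
        r ++ [(-(PySem.List.pyGetD priority_elm (PySem.List.pyGetD state (z + 2) 0) 0),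
               PySem.List.pyGetD state (z + 2) 0)]
      else if move = -1 then
        r ++ [(-(PySem.List.pyGetD priority_elm (PySem.List.pyGetD state (z - 1) 0) 0),
               PySem.List.pyGetD state (z - 1) 0)]
      else if move = -2 then
        r ++ [(-(PySem.List.pyGetD priority_elm (PySem.List.pyGetD state (z - 2) 0) 0),
               PySem.List.pyGetD state (z - 2) 0)]
      else r)
      = (fun r move =>
        if move = 1 ∨ move = 2 ∨ move = -1 ∨ move = -2 then
          r ++ [pvPair state priority_elm z move] else r) := by
    funext r move
    by_cases h1 : move = 1
    · subst h1; simp [pvPair]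
    · by_cases h2 : move = 2
      · subst h2; simp [pvPair]
      · by_cases h3 : move = -1
        · subst h3; simp [pvPair, sub_eq_add_neg]
        · by_cases h4 : move = -2
          · subst h4; simp [pvPair, sub_eq_add_neg]
          · simp [h1, h2, h3, h4]
  rw [hstep]
  exact pvFoldAIf state priority_elm z mov

-- the offsets dict recognises exactly the four moves, and maps each to itself
lemma pvGetOff (m : Int) :
    PySem.Dict.get? (PySem.Dict.ofList [((1:Int), (1:Int)), (2, 2), (-1, -1), (-2, -2)]) m
      = if m = 1 ∨ m = 2 ∨ m = -1 ∨ m = -2 then some m else none := by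
  have hitems : (PySem.Dict.ofList [((1:Int), (1:Int)), (2, 2), (-1, -1), (-2, -2)]).items
      = [((1:Int), (1:Int)), (2, 2), (-1, -1), (-2, -2)] := by decide
  by_cases h1 : m = 1
  · subst h1; decide
  · by_cases h2 : m = 2
    · subst h2; decide
    · by_cases h3 : m = -1
      · subst h3; decide
      · by_cases h4 : m = -2
        · subst h4; decide
        · have e1 : ((1 : Int) == m) = false := by
            rw [beq_eq_false_iff_ne]; exact fun h => h1 h.symm
          have e2 : ((2 : Int) == m) = false := by
            rw [beq_eq_false_iff_ne]; exact fun h => h2 h.symm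
          have e3 : ((-1 : Int) == m) = false := by
            rw [beq_eq_false_iff_ne]; exact fun h => h3 h.symm
          have e4 : ((-2 : Int) == m) = false := by
            rw [beq_eq_false_iff_ne]; exact fun h => h4 h.symm
          simp [PySem.Dict.get?, hitems, e1, e2, e3, e4, h1, h2, h3, h4]

-- B's selection loop with the offsets lookup resolved
lemma pvFoldIf (state priority_elm : List Int) (z : Int) (mov : List Int) :
    ∀ acc : Option (Int × Int) × Option (Int × Int),
    mov.foldl (fun acc move =>
        if move = 1 ∨ move = 2 ∨ move = -1 ∨ move = -2 then
          pvStep2 acc (pvPair state priority_elm z move) else acc) acc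
      = (pvCands state priority_elm z mov).foldl pvStep2 acc := by
  induction mov with
  | nil => intro acc; simp [pvCands]
  | cons m t ih =>
    intro acc
    rw [List.foldl_cons]
    by_cases h : m = 1 ∨ m = 2 ∨ m = -1 ∨ m = -2
    · rw [if_pos h, ih]
      simp only [pvCands, List.filterMap_cons, if_pos h, List.foldl_cons]
    · rw [if_neg h, ih]
      simp only [pvCands, List.filterMap_cons, if_neg h]

-- B's selection loop is the pvStep2 fold over the same candidate pairs
lemma pvFoldB (state priority_elm : List Int) (z : Int) (mov : List Int) :
    ∀ acc : Option (Int × Int) × Option (Int × Int),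
    mov.foldl (fun acc move =>
      match PySem.Dict.get? (PySem.Dict.ofList [((1:Int), (1:Int)), (2, 2), (-1, -1), (-2, -2)]) move with
      | none => acc
      | some off =>
        let e := PySem.List.pyGetD state (z + off) 0
        pvStep2 acc (-(PySem.List.pyGetD priority_elm e 0), e)) acc
    = (pvCands state priority_elm z mov).foldl pvStep2 acc := by
  have hstep : (fun (acc : Option (Int × Int) × Option (Int × Int)) (move : Int) =>
      match PySem.Dict.get? (PySem.Dict.ofList [((1:Int), (1:Int)), (2, 2), (-1, -1), (-2, -2)]) move with
      | none => acc
      | some off =>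
        let e := PySem.List.pyGetD state (z + off) 0
        pvStep2 acc (-(PySem.List.pyGetD priority_elm e 0), e))
      = (fun acc move =>
        if move = 1 ∨ move = 2 ∨ move = -1 ∨ move = -2 then
          pvStep2 acc (pvPair state priority_elm z move) else acc) := by
    funext acc move
    rw [pvGetOff]
    split_ifs with h
    · rfl
    · rfl
  intro acc
  rw [hstep]
  exact pvFoldIf state priority_elm z mov acc

-- one selection step tracks the first two elements of the insertion-sorted list
lemma pvStep2_insertBy (s : List (Int × Int)) (k : Int × Int) :
    pvStep2 (s[0]?, s[1]?) k = ((PySem.List.insertBy pvKeyLt k s)[0]?, (PySem.List.insertBy pvKeyLt k s)[1]?) := by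
  match s with
  | [] => simp [pvStep2, PySem.List.insertBy]
  | [b] =>
    by_cases h : pvKeyLt k b = true <;>
      simp [pvStep2, PySem.List.insertBy, h]
  | b :: c :: t =>
    by_cases h : pvKeyLt k b = true
    · simp [pvStep2, PySem.List.insertBy, h]
    · by_cases h2 : pvKeyLt k c = true <;>
        simp [pvStep2, PySem.List.insertBy, h, h2]

-- the whole selection fold tracks the first two elements of the insertion sort
lemma pvFold2 (l : List (Int × Int)) : ∀ s : List (Int × Int),
    l.foldl pvStep2 (s[0]?, s[1]?) =
      ((l.foldl (fun acc x => PySem.List.insertBy pvKeyLt x acc) s)[0]?,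
       (l.foldl (fun acc x => PySem.List.insertBy pvKeyLt x acc) s)[1]?) := by
  induction l with
  | nil => intro s; simp
  | cons k t ih =>
    intro s
    rw [List.foldl_cons, pvStep2_insertBy, List.foldl_cons]
    exact ih _

-- A's final read-out from the sorted list equals B's read-out from its (best, second) pair
lemma pvFinal (s : List (Int × Int)) :
    (let res := s.take 2
     if 1 < res.length ∧ (res.getD 0 (0, 0)).1 = (res.getD 1 (0, 0)).1 then
       (res.getD 1 (0, 0)).2
     else (s.getD 0 (0, 0)).2)
    = (match s[0]?, s[1]? with
       | some b, some s2 => if b.1 = s2.1 then s2.2 else b.2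
       | some b, none => b.2
       | none, _ => 0) := by
  match s with
  | [] => simp
  | [b] => simp
  | b :: c :: t => by_cases h : b.1 = c.1 <;> simp [h]

-- ===== VERDICT (by name: the statement is the Claim_ definition above) =====
theorem get_focus_elm_spec : Claim_equal_get_focus_elm := by
  intro state priority_elm possibilities_mov _ _
  unfold Spec_get_focus_elm get_focus_elm get_focus_elm_alt
  simp only []
  rw [pvFoldA state priority_elm _ possibilities_mov [], pvFoldB state priority_elm _ possibilities_mov]
  rw [pvSorted2_eq, List.nil_append]
  have h2 := pvFold2 (pvCands state priority_elm (((PySem.List.index? state 0).getD 0 : Nat) : Int)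
    possibilities_mov) []
  simp only [List.getElem?_nil] at h2
  rw [h2, pvFinal]
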